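-- pv_equiv track=rewrite | github.com/Syeosle/2023RnE_Python | 22085 SYL/syllables.py | splitPoints
-- ===== SOURCE A (Python) =====
-- EXCEPTION_ENG = {'cafe': 2}
--
-- VOWEL_ENG = 'aeiouy'
--
-- def syllEng(string):  # 글자만 남은 lowercase 단어 -> syllables
--     if string in EXCEPTION_ENG: return EXCEPTION_ENG[string]
--     cnt = 0
--     string = ' ' + string
--     for i in range(1, len(string)):
--         if string[i-1] not in VOWEL_ENG and string[i] in VOWEL_ENG: cnt += 1
--     if string[-1] == 'e' and string[-2] not in 'l' + VOWEL_ENG: cnt -= 1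
--     return cnt
--
-- def syllRom(string):  # 글자만 남은 lowercase 단어 -> syllables
--     cnt = 0
--     string = ' ' + string
--     for i in range(1, len(string)):
--         if string[i-1] not in VOWEL_ENG and string[i] in VOWEL_ENG: cnt += 1
--     return cnt
--
-- def splitPoints(string, isRoman=False):  # 글자만 남은 lowercase 문장 -> 띄어 쓰기의 음절 위치 (마지막은 총 음절)
--     words = string.split()
--     L = []  # result
--     for word in words:
--         if word.encode().isalpha():
--             if isRoman: L.append(syllRom(word))
--             else: L.append(syllEng(word))
--         else: L.append(len(word))
--
--     for i in range(1, len(L)):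
--         L[i] += L[i-1]
--     return L
-- ===== SOURCE B (Python) =====
-- EXCEPTION_ENG = {'cafe': 2}
--
-- VOWEL_ENG = 'aeiouy'
--
-- def _vowelRuns(word):
--     # syllables = number of maximal vowel runs: blank out consonants and count the pieces
--     return len(''.join(c if c in VOWEL_ENG else ' ' for c in word).split())
--
-- def syllEng(word):
--     if word in EXCEPTION_ENG: return EXCEPTION_ENG[word]
--     cnt = _vowelRuns(word)
--     if word.endswith('e') and (len(word) < 2 or word[-2] not in 'l' + VOWEL_ENG):
--         cnt -= 1
--     return cnt
--
-- def syllRom(word):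
--     return _vowelRuns(word)
--
-- def splitPoints(string, isRoman=False):
--     total = 0
--     result = []
--     for word in string.split():
--         if word.isalpha():
--             total += syllRom(word) if isRoman else syllEng(word)
--         else:
--             total += len(word)
--         result.append(total)
--     return result
-- ===== Notes on version B (the rewrite author's own statement) =====
-- stated objective: alternative
-- what changed: B counts a word's syllables as the number of maximal vowel runs (blank out non-vowels, split, count the pieces) instead of A's indexed scan over consonant-vowel adjacent pairs, and threads a running total through one pass instead of A's build-then-in-place-prefix-sum.
import Mathlib
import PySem

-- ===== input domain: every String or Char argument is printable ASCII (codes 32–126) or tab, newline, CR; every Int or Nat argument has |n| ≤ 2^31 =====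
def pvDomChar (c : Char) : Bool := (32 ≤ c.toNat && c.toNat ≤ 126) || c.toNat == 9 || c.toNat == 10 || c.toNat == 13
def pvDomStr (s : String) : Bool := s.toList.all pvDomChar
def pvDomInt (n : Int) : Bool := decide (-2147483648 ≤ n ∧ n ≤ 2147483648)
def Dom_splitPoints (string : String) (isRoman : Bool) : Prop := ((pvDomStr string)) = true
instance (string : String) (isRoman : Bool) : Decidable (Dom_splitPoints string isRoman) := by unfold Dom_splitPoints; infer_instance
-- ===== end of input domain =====

-- B counts syllables as maximal vowel runs (blank out consonants, split, count pieces)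
-- and threads a running total; A counts consonant→vowel transitions by index pairs and
-- prefix-sums a list in place afterwards. Same return value, no speed claim.


-- ===== PORT A =====
-- c in VOWEL_ENG (single character, so substring test = membership)
def pvVowel (c : Char) : Bool := "aeiouy".toList.contains c

-- syllEng; the trailing string[-1]/string[-2] accesses are ported with pyGetD:
-- string = ' ' + word is nonempty and of length ≥ 2, so both indices are in range.
def pvSyllEng (cs : List Char) : Int :=
  if cs = "cafe".toList then 2 else
  let t := ' ' :: cs
  let cnt : Int := (PySem.List.pyRange 1 (PySem.List.len t) 1).foldl
    (fun cnt i =>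
      if !pvVowel (PySem.List.pyGetD t (i - 1) ' ') && pvVowel (PySem.List.pyGetD t i ' ')
      then cnt + 1 else cnt) 0
  if PySem.List.pyGetD t (-1) ' ' = 'e' && !("laeiouy".toList.contains (PySem.List.pyGetD t (-2) ' '))
  then cnt - 1 else cnt

def pvSyllRom (cs : List Char) : Int :=
  let t := ' ' :: cs
  (PySem.List.pyRange 1 (PySem.List.len t) 1).foldl
    (fun cnt i =>
      if !pvVowel (PySem.List.pyGetD t (i - 1) ' ') && pvVowel (PySem.List.pyGetD t i ' ')
      then cnt + 1 else cnt) 0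

-- word.encode().isalpha() ported as strIsalpha: exact on the ASCII domain Dom_splitPoints
def splitPoints (string : String) (isRoman : Bool) : List Int :=
  let words := PySem.Chars.split₀ string.toList
  let L := words.foldl (fun L w =>
    L ++ [if PySem.Chars.strIsalpha w then (if isRoman then pvSyllRom w else pvSyllEng w)
          else PySem.List.len w]) []
  (PySem.List.pyRange 1 (PySem.List.len L) 1).foldl
    (fun M i => PySem.List.pySetD M i (PySem.List.pyGetD M i 0 + PySem.List.pyGetD M (i - 1) 0)) L

-- ===== PORT B =====
-- _vowelRuns: blank out non-vowels, split on whitespace, count the pieces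
def pvVowelRuns (w : List Char) : Int :=
  ((PySem.Chars.split₀ (w.map (fun c => if pvVowel c then c else ' '))).length : Int)

-- B's syllEng: word[-2] is only read when len(word) ≥ 2 (short-circuit `or`)
def pvSyllEngB (w : List Char) : Int :=
  if w = "cafe".toList then 2 else
  let cnt := pvVowelRuns w
  if PySem.Chars.endswith w "e".toList &&
     (decide (w.length < 2) || !("laeiouy".toList.contains (PySem.List.pyGetD w (-2) ' ')))
  then cnt - 1 else cnt

-- word.isalpha() ported as strIsalpha: exact on the ASCII domain Dom_splitPoints
def pvAltGo (isRoman : Bool) (total : Int) : List (List Char) → List Int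
  | [] => []
  | w :: ws =>
    let t := total + (if PySem.Chars.strIsalpha w then (if isRoman then pvVowelRuns w else pvSyllEngB w)
                      else PySem.List.len w)
    t :: pvAltGo isRoman t ws

def splitPoints_alt (string : String) (isRoman : Bool) : List Int :=
  pvAltGo isRoman 0 (PySem.Chars.split₀ string.toList)

-- ===== PRECONDITION & SPEC =====
def Spec_splitPoints (string : String) (isRoman : Bool) (out : List Int) : Prop := out = splitPoints_alt string isRoman
instance (string : String) (isRoman : Bool) (out : List Int) : Decidable (Spec_splitPoints string isRoman out) := by unfold Spec_splitPoints; infer_instance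

-- ===== CLAIM (what is proved, stated in full; the proofs are below) =====
def Claim_equal_splitPoints : Prop := ∀ (string : String) (isRoman : Bool), Dom_splitPoints string isRoman → Spec_splitPoints string isRoman (splitPoints string isRoman)

-- ===== LEMMAS AND PROOFS =====
-- number of consonant→vowel transitions, given whether the previous char was a vowel
def pvPairCount (prev : Bool) : List Char → Int
  | [] => 0
  | c :: cs => (if !prev && pvVowel c then 1 else 0) + pvPairCount (pvVowel c) cs

-- word count of split₀, given whether we are inside a word
def pvWc (inRun : Bool) : List Char → Nat
  | [] => 0
  | c :: cs => if PySem.Chars.isspace c then pvWc false cs else (if inRun then 0 else 1) + pvWc true cs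

theorem pvGoLen (s : List Char) : ∀ (cur : List Char) (acc : List (List Char)),
    (PySem.Chars.split₀.go s cur acc).length
      = acc.length + (if cur.isEmpty then 0 else 1) + pvWc (!cur.isEmpty) s := by
  induction s with
  | nil =>
    intro cur acc
    cases cur <;> simp [PySem.Chars.split₀.go, pvWc]
  | cons c rest ih =>
    intro cur acc
    by_cases hc : PySem.Chars.isspace c
    · cases cur <;> simp [PySem.Chars.split₀.go, hc, ih, pvWc]
    · cases cur with
      | nil =>
        simp [PySem.Chars.split₀.go, hc, ih, pvWc]
        omega
      | cons x xs => simp [PySem.Chars.split₀.go, hc, ih, pvWc]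

theorem pvVowel_not_space (c : Char) (h : pvVowel c = true) : PySem.Chars.isspace c = false := by
  simp [pvVowel] at h
  rcases h with h | h | h | h | h | h <;> subst h <;> decide

theorem pvWc_map (w : List Char) : ∀ (prev : Bool),
    ((pvWc prev (w.map (fun c => if pvVowel c then c else ' ')) : Nat) : Int) = pvPairCount prev w := by
  induction w with
  | nil => intro prev; simp [pvWc, pvPairCount]
  | cons c cs ih =>
    intro prev
    have hsp : PySem.Chars.isspace ' ' = true := by decide
    by_cases hv : pvVowel c
    · have hns := pvVowel_not_space c hv
      simp only [List.map_cons, hv, if_true, pvWc, hns, Bool.false_eq_true, if_false, pvPairCount]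
      cases prev <;> simp [← ih]
    · have hvf : pvVowel c = false := by simpa using hv
      simp [pvWc, pvPairCount, hvf, hsp, ← ih]

theorem pvRuns_eq (w : List Char) : pvVowelRuns w = pvPairCount false w := by
  have h := pvGoLen (w.map (fun c => if pvVowel c then c else ' ')) [] []
  simp at h
  simp [pvVowelRuns, PySem.Chars.split₀, h, ← pvWc_map w false]

theorem pvAFold (u : List Char) : ∀ (Q : List Char) (c : Int), Q ≠ [] →
    (PySem.List.pyRange (Q.length : Int) ((Q.length : Int) + u.length) 1).foldl
      (fun cnt i =>
        if !pvVowel (PySem.List.pyGetD (Q ++ u) (i - 1) ' ') && pvVowel (PySem.List.pyGetD (Q ++ u) i ' ')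
        then cnt + 1 else cnt) c
    = c + pvPairCount (pvVowel (Q.getLastD ' ')) u := by
  induction u with
  | nil =>
    intro Q c hQ
    simp [PySem.List.pyRange_one_eq_nil, pvPairCount]
  | cons x xs ih =>
    intro Q c hQ
    rw [PySem.List.pyRange_one_cons (by simp)]
    rw [List.foldl_cons]
    have hget : PySem.List.pyGetD (Q ++ x :: xs) ((Q.length : Int)) ' ' = x := by
      rw [PySem.List.pyGetD_natCast]
      rw [List.getD_eq_getElem?_getD, List.getElem?_append_right (by omega)]
      simp
    have hprev : PySem.List.pyGetD (Q ++ x :: xs) ((Q.length : Int) - 1) ' ' = Q.getLastD ' ' := by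
      have hlen : 0 < Q.length := List.length_pos_of_ne_nil hQ
      have : ((Q.length : Int) - 1) = ((Q.length - 1 : Nat) : Int) := by omega
      rw [this, PySem.List.pyGetD_natCast]
      rw [List.getD_eq_getElem?_getD, List.getElem?_append_left (by omega)]
      rw [List.getLastD_eq_getLast?, List.getLast?_eq_getElem?]
    rw [hget, hprev]
    have hQx : Q ++ [x] ≠ [] := by simp
    have h1 : (Q.length : Int) + 1 = ((Q ++ [x]).length : Int) := by simp
    have h2 : (Q.length : Int) + ((x :: xs).length : Int) = ((Q ++ [x]).length : Int) + (xs.length : Int) := by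
      simp; ring
    have h3 : Q ++ x :: xs = (Q ++ [x]) ++ xs := by simp
    rw [h1, h2, h3, ih (Q ++ [x]) _ hQx]
    have hlast : (Q ++ [x]).getLastD ' ' = x := by simp
    rw [hlast]
    simp only [pvPairCount]
    split_ifs <;> ring

theorem pvRom_eq (w : List Char) : pvSyllRom w = pvPairCount false w := by
  have h := pvAFold w [' '] 0 (by simp)
  simp only [List.singleton_append, List.length_cons, List.length_nil, Nat.zero_add,
    Nat.cast_one] at h
  have hv : pvVowel (([' '] : List Char).getLastD ' ') = false := by decide
  rw [hv] at h
  simp only [pvSyllRom]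
  rw [show PySem.List.len (' ' :: w) = 1 + (w.length : Int) by simp [PySem.List.len_eq]; ring]
  exact h.trans (by ring)

theorem pvEndsE (ws : List Char) (a : Char) :
    PySem.Chars.endswith (ws ++ [a]) "e".toList = decide (a = 'e') := by
  by_cases ha : a = 'e'
  · subst ha
    simp only [decide_true]
    exact (PySem.Chars.endswith_iff _ _).mpr ⟨ws, rfl⟩
  · simp only [ha, decide_false]
    rw [Bool.eq_false_iff]
    intro h
    rcases (PySem.Chars.endswith_iff _ _).mp h with ⟨t, ht⟩
    have := congrArg (fun l => l.getLastD ' ') ht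
    simp at this
    exact ha this.symm

-- the two trailing-e tests agree on every word
theorem pvCond_eq (w : List Char) :
    (decide (PySem.List.pyGetD (' ' :: w) (-1) ' ' = 'e') && !("laeiouy".toList.contains (PySem.List.pyGetD (' ' :: w) (-2) ' ')))
    = (PySem.Chars.endswith w "e".toList &&
       (decide (w.length < 2) || !("laeiouy".toList.contains (PySem.List.pyGetD w (-2) ' ')))) := by
  induction w using List.reverseRecOn with
  | nil => decide
  | append_singleton ws a _ =>
    have h1 : PySem.List.pyGetD (' ' :: (ws ++ [a])) (-1) ' ' = a := by
      rw [show (' ' :: (ws ++ [a])) = (' ' :: ws) ++ [a] by simp]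
      exact PySem.List.pyGetD_neg_one_append_singleton _ _ _
    have h2 : PySem.Chars.endswith (ws ++ [a]) "e".toList = decide (a = 'e') := pvEndsE ws a
    rw [h1, h2]
    cases ws using List.reverseRecOn with
    | nil =>
      have h3 : PySem.List.pyGetD (' ' :: ([] ++ [a])) (-2) ' ' = ' ' := by
        rw [PySem.List.pyGetD_neg_ofNat _ 2 ' ' (by norm_num) (by simp)]
        simp
      rw [h3]
      simp
    | append_singleton ys b _ =>
      have h4 : PySem.List.pyGetD (' ' :: ((ys ++ [b]) ++ [a])) (-2) ' ' = b := by
        rw [PySem.List.pyGetD_neg_ofNat _ 2 ' ' (by norm_num) (by simp)]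
        rw [List.getElem_eq_iff,
          show (' ' :: ((ys ++ [b]) ++ [a])).length - 2 = ys.length + 1 by simp]
        rw [List.getElem?_cons_succ, List.getElem?_append_left (by simp)]
        exact List.getElem?_concat_length
      have h5 : PySem.List.pyGetD ((ys ++ [b]) ++ [a]) (-2) ' ' = b := by
        rw [PySem.List.pyGetD_neg_ofNat _ 2 ' ' (by norm_num) (by simp)]
        rw [List.getElem_eq_iff,
          show ((ys ++ [b]) ++ [a]).length - 2 = ys.length by simp]
        rw [List.getElem?_append_left (by simp)]
        exact List.getElem?_concat_length
      have h6 : decide (((ys ++ [b]) ++ [a]).length < 2) = false := by simp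
      rw [h4, h5, h6]
      simp

theorem pvEng_eq (w : List Char) : pvSyllEng w = pvSyllEngB w := by
  by_cases hc : w = "cafe".toList
  · simp [pvSyllEng, pvSyllEngB, hc]
  · have hbase : (PySem.List.pyRange 1 (PySem.List.len (' ' :: w)) 1).foldl
        (fun cnt i =>
          if !pvVowel (PySem.List.pyGetD (' ' :: w) (i - 1) ' ') && pvVowel (PySem.List.pyGetD (' ' :: w) i ' ')
          then cnt + 1 else cnt) 0 = pvPairCount false w := by
      have := pvRom_eq w
      simpa [pvSyllRom] using this
    simp only [pvSyllEng, pvSyllEngB, if_neg hc]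
    rw [hbase, pvRuns_eq w, pvCond_eq w]

-- per-word values agree
theorem pvVal_eq (isRoman : Bool) (w : List Char) :
    (if PySem.Chars.strIsalpha w then (if isRoman then pvSyllRom w else pvSyllEng w)
     else PySem.List.len w)
    = (if PySem.Chars.strIsalpha w then (if isRoman then pvVowelRuns w else pvSyllEngB w)
       else PySem.List.len w) := by
  rw [pvRom_eq, pvEng_eq, ← pvRuns_eq]

-- cumulative sums with running total t, heads written as x + t to match A's loop
def pvCum (t : Int) : List Int → List Int
  | [] => []
  | x :: xs => (x + t) :: pvCum (x + t) xs

theorem pvFoldlApp {α : Type} (v : α → Int) (ws : List α) (acc : List Int) :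
    ws.foldl (fun L w => L ++ [v w]) acc = acc ++ ws.map v := by
  induction ws generalizing acc with
  | nil => simp
  | cons w ws ih => simp [ih]

theorem pvAltGo_eq (isRoman : Bool) (ws : List (List Char)) (t : Int) :
    pvAltGo isRoman t ws = pvCum t (ws.map (fun w =>
      if PySem.Chars.strIsalpha w then (if isRoman then pvVowelRuns w else pvSyllEngB w)
      else PySem.List.len w)) := by
  induction ws generalizing t with
  | nil => simp [pvAltGo, pvCum]
  | cons w ws ih => simp [pvAltGo, pvCum, ih, Int.add_comm]

theorem pvLoop_eq (R : List Int) : ∀ (Q : List Int) (t : Int),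
    (PySem.List.pyRange ((Q.length : Int) + 1) ((Q.length : Int) + 1 + R.length) 1).foldl
      (fun M i => PySem.List.pySetD M i (PySem.List.pyGetD M i 0 + PySem.List.pyGetD M (i - 1) 0))
      ((Q ++ [t]) ++ R)
    = (Q ++ [t]) ++ pvCum t R := by
  induction R with
  | nil => intro Q t; simp [PySem.List.pyRange_one_eq_nil, pvCum]
  | cons x xs ih =>
    intro Q t
    rw [PySem.List.pyRange_one_cons (by simp only [List.length_cons]; omega)]
    rw [List.foldl_cons]
    have hget1 : PySem.List.pyGetD ((Q ++ [t]) ++ x :: xs) ((Q.length : Int) + 1) 0 = x := by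
      have : ((Q.length : Int) + 1) = ((Q.length + 1 : Nat) : Int) := by push_cast; ring
      rw [this, PySem.List.pyGetD_natCast]
      rw [List.getD_eq_getElem?_getD, List.getElem?_append_right (by simp)]
      simp
    have hget0 : PySem.List.pyGetD ((Q ++ [t]) ++ x :: xs) ((Q.length : Int) + 1 - 1) 0 = t := by
      have : ((Q.length : Int) + 1 - 1) = ((Q.length : Nat) : Int) := by ring
      rw [this, PySem.List.pyGetD_natCast]
      rw [List.getD_eq_getElem?_getD, List.getElem?_append_left (by simp)]
      rw [List.getElem?_append_right (by simp)]
      simp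
    have hset : PySem.List.pySetD ((Q ++ [t]) ++ x :: xs) ((Q.length : Int) + 1) (x + t)
        = ((Q ++ [t]) ++ [x + t]) ++ xs := by
      have : ((Q.length : Int) + 1) = ((Q.length + 1 : Nat) : Int) := by push_cast; ring
      rw [this, PySem.List.pySetD_natCast]
      rw [List.set_append]
      simp
    rw [hget1, hget0, hset]
    have hidx : (Q.length : Int) + 1 + 1 = (((Q ++ [t]).length : Int)) + 1 := by simp
    have hend : (Q.length : Int) + 1 + ((x :: xs).length : Int)
        = (((Q ++ [t]).length : Int)) + 1 + (xs.length : Int) := by simp; ring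
    rw [hidx, hend, ih (Q ++ [t]) (x + t)]
    simp [pvCum]

theorem pvLoop_eq0 (t : Int) (R : List Int) :
    (PySem.List.pyRange 1 (PySem.List.len (t :: R)) 1).foldl
      (fun M i => PySem.List.pySetD M i (PySem.List.pyGetD M i 0 + PySem.List.pyGetD M (i - 1) 0))
      (t :: R)
    = t :: pvCum t R := by
  have h := pvLoop_eq R [] t
  simp only [List.length_nil, Nat.cast_zero, zero_add, List.nil_append, List.singleton_append] at h
  rw [show PySem.List.len (t :: R) = 1 + (R.length : Int) by simp [PySem.List.len_eq]; ring]
  exact h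

theorem splitPoints_eq_alt (string : String) (isRoman : Bool) :
    splitPoints string isRoman = splitPoints_alt string isRoman := by
  simp only [splitPoints, splitPoints_alt]
  rw [pvAltGo_eq]
  rw [pvFoldlApp (fun w =>
      if PySem.Chars.strIsalpha w then (if isRoman then pvSyllRom w else pvSyllEng w)
      else PySem.List.len w)]
  have hmap : (PySem.Chars.split₀ string.toList).map (fun w =>
      if PySem.Chars.strIsalpha w then (if isRoman then pvSyllRom w else pvSyllEng w)
      else PySem.List.len w)
      = (PySem.Chars.split₀ string.toList).map (fun w =>
      if PySem.Chars.strIsalpha w then (if isRoman then pvVowelRuns w else pvSyllEngB w)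
      else PySem.List.len w) := List.map_congr_left (fun w _ => pvVal_eq isRoman w)
  rw [hmap]
  cases h : (PySem.Chars.split₀ string.toList).map (fun w =>
      if PySem.Chars.strIsalpha w then (if isRoman then pvVowelRuns w else pvSyllEngB w)
      else PySem.List.len w) with
  | nil => simp [PySem.List.pyRange_one_eq_nil, pvCum]
  | cons x xs =>
    simp only [List.nil_append]
    rw [pvLoop_eq0 x xs]
    simp [pvCum]

-- ===== VERDICT (by name: the statement is the Claim_ definition above) =====
theorem splitPoints_spec : Claim_equal_splitPoints := by
  intro string isRoman _
  unfold Spec_splitPoints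
  exact splitPoints_eq_alt string isRoman
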